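-- pv_equiv track=rewrite | github.com/AlexGoAhead/hw | 24.py | group_by_surname
-- ===== SOURCE A (Python) =====
-- def group_by_surname(list_of_enrollees):
--     A2I = []
--     J2P = []
--     Q2T = []
--     U2Z = []
--     for surname2 in list_of_enrollees:
--         surname = surname2.split()[1]
--         if ord('%s' % surname[0]) < ord('J'):
--             A2I.append(surname)
--         elif ord('%s' % surname[0]) < ord('Q'):
--             J2P.append(surname)
--         elif ord('%s' % surname[0]) < ord('U'):
--             Q2T.append(surname)
--         elif ord('%s' % surname[0]) <= ord('Z'):
--             U2Z.append(surname)
--     return len(A2I), len(J2P), len(Q2T), len(U2Z)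
-- ===== SOURCE B (Python) =====
-- def group_by_surname(list_of_enrollees):
--     # Pass 1: frequency table of the surname's first letter.
--     freq = {}
--     for entry in list_of_enrollees:
--         c = entry.split()[1][0]
--         freq[c] = freq.get(c, 0) + 1
--     # Pass 2: aggregate frequencies over the four code-point ranges.
--     a2i = sum(n for c, n in freq.items() if ord(c) < ord('J'))
--     j2p = sum(n for c, n in freq.items() if ord('J') <= ord(c) < ord('Q'))
--     q2t = sum(n for c, n in freq.items() if ord('Q') <= ord(c) < ord('U'))
--     u2z = sum(n for c, n in freq.items() if ord('U') <= ord(c) <= ord('Z'))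
--     return a2i, j2p, q2t, u2z
-- ===== Notes on version B (the rewrite author's own statement) =====
-- stated objective: alternative
-- what changed: Replaces the four append-lists-then-len buckets with a two-pass table-then-aggregate shape: one pass builds a dict of first-letter frequencies, a second pass sums the frequencies over the four code-point ranges.
import Mathlib
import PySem

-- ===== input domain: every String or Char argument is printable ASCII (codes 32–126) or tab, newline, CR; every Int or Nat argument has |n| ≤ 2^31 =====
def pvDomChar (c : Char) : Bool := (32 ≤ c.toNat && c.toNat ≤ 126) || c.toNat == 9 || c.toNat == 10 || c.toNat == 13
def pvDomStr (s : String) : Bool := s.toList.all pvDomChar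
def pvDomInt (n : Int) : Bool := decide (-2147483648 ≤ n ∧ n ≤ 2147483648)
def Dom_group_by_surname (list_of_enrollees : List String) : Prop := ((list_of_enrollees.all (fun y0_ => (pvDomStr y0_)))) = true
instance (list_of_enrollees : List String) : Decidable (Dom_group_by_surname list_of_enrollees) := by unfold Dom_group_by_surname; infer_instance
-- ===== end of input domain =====

-- B replaces A's four append-lists-then-len buckets with a two-pass shape: a frequency
-- dict of surname first letters, then range sums over its items (alternative, same cost).


-- ===== PORT A =====
-- the if-chain loop over the four bucket lists; none = the IndexError of split()[1]
def pvLoopA : List String → (List String × List String × List String × List String) →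
    Option (List String × List String × List String × List String)
  | [], acc => some acc
  | surname2 :: rest, (a2i, j2p, q2t, u2z) =>
    match PySem.List.pyGet? (PySem.Str.split₀ surname2) 1 with
    | none => none
    | some surname =>
      match PySem.Str.pyGet? surname 0 with
      | none => none
      | some c =>
        if c.toNat < 'J'.toNat then pvLoopA rest (a2i ++ [surname], j2p, q2t, u2z)
        else if c.toNat < 'Q'.toNat then pvLoopA rest (a2i, j2p ++ [surname], q2t, u2z)
        else if c.toNat < 'U'.toNat then pvLoopA rest (a2i, j2p, q2t ++ [surname], u2z)
        else if c.toNat ≤ 'Z'.toNat then pvLoopA rest (a2i, j2p, q2t, u2z ++ [surname])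
        else pvLoopA rest (a2i, j2p, q2t, u2z)

def group_by_surname (list_of_enrollees : List String) : Int × Int × Int × Int :=
  match pvLoopA list_of_enrollees ([], [], [], []) with
  | some (a2i, j2p, q2t, u2z) =>
      ((a2i.length : Int), (j2p.length : Int), (q2t.length : Int), (u2z.length : Int))
  | none => (0, 0, 0, 0)

-- ===== PORT B =====
-- pass 1: frequency dict of first letters (none = the same IndexError)
def pvLoopB : List String → PySem.Dict Char Int → Option (PySem.Dict Char Int)
  | [], d => some d
  | entry :: rest, d =>
    match PySem.List.pyGet? (PySem.Str.split₀ entry) 1 with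
    | none => none
    | some w =>
      match PySem.Str.pyGet? w 0 with
      | none => none
      | some c => pvLoopB rest (d.insert c (d.getD c 0 + 1))

-- the four code-point range tests of pass 2
def pvA2I (c : Char) : Bool := decide (c.toNat < 'J'.toNat)
def pvJ2P (c : Char) : Bool := decide ('J'.toNat ≤ c.toNat ∧ c.toNat < 'Q'.toNat)
def pvQ2T (c : Char) : Bool := decide ('Q'.toNat ≤ c.toNat ∧ c.toNat < 'U'.toNat)
def pvU2Z (c : Char) : Bool := decide ('U'.toNat ≤ c.toNat ∧ c.toNat ≤ 'Z'.toNat)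

-- sum(n for c, n in items if p c)
def pvRangeSum (items : List (Char × Int)) (p : Char → Bool) : Int :=
  (items.filter (fun q => p q.1)).foldl (fun acc q => acc + q.2) 0

def group_by_surname_alt (list_of_enrollees : List String) : Int × Int × Int × Int :=
  match pvLoopB list_of_enrollees PySem.Dict.empty with
  | none => (0, 0, 0, 0)
  | some freq =>
      (pvRangeSum freq.items pvA2I, pvRangeSum freq.items pvJ2P,
       pvRangeSum freq.items pvQ2T, pvRangeSum freq.items pvU2Z)

-- ===== PRECONDITION & SPEC =====
-- Pre_ excludes exactly the entries on which Python A raises IndexError: a string with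
-- fewer than two whitespace-separated words (split()[1] fails); B raises there too.
def Pre_group_by_surname (list_of_enrollees : List String) : Prop :=
  ∀ s ∈ list_of_enrollees, 2 ≤ (PySem.Str.split₀ s).length
  -- e.g. "Ivan Petrov" and "Anna P Karenina" are admitted, "Ivan" and "" are not
instance (list_of_enrollees : List String) : Decidable (Pre_group_by_surname list_of_enrollees) := by
  unfold Pre_group_by_surname; infer_instance
def pvWitness_group_by_surname : List String := ["Anna Karenina", "Lev Tolstoy"]

def Spec_group_by_surname (list_of_enrollees : List String) (out : Int × Int × Int × Int) : Prop :=
  out = group_by_surname_alt list_of_enrollees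
instance (list_of_enrollees : List String) (out : Int × Int × Int × Int) :
    Decidable (Spec_group_by_surname list_of_enrollees out) := by
  unfold Spec_group_by_surname; infer_instance

-- ===== CLAIM (what is proved, stated in full; the proofs are below) =====
def Claim_equal_group_by_surname : Prop :=
  ∀ (list_of_enrollees : List String), Dom_group_by_surname list_of_enrollees →
    Pre_group_by_surname list_of_enrollees →
    Spec_group_by_surname list_of_enrollees (group_by_surname list_of_enrollees)

-- ===== LEMMAS AND PROOFS =====

-- words produced by split() are never empty
theorem pv_go_ne_nil : ∀ (s cur : List Char) (acc : List (List Char)),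
    (∀ w ∈ acc, w ≠ []) → ∀ w ∈ PySem.Chars.split₀.go s cur acc, w ≠ ([] : List Char) := by
  intro s
  induction s with
  | nil =>
    intro cur acc hacc w hw
    by_cases hc : cur.isEmpty <;>
      simp [PySem.Chars.split₀.go, hc] at hw
    · exact hacc w hw
    · rcases hw with h | h
      · exact hacc w h
      · subst h; simpa [List.isEmpty_iff] using hc
  | cons c rest ih =>
    intro cur acc hacc w hw
    by_cases hs : PySem.Chars.isspace c
    · by_cases hc : cur.isEmpty
      · simp only [PySem.Chars.split₀.go, hs, hc, if_true] at hw
        exact ih [] acc hacc w hw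
      · simp only [PySem.Chars.split₀.go, hs, hc, if_true] at hw
        refine ih [] (cur.reverse :: acc) ?_ w hw
        intro v hv
        rcases List.mem_cons.mp hv with hv | hv
        · subst hv; simpa [List.isEmpty_iff] using hc
        · exact hacc v hv
    · simp only [PySem.Chars.split₀.go, hs] at hw
      exact ih (c :: cur) acc hacc w hw

theorem pv_split₀_ne_nil (s : List Char) : ∀ w ∈ PySem.Chars.split₀ s, w ≠ ([] : List Char) := by
  intro w hw
  exact pv_go_ne_nil s [] [] (by simp) w hw

theorem pv_str_split₀_toList_ne_nil (s : String) :
    ∀ w ∈ PySem.Str.split₀ s, w.toList ≠ ([] : List Char) := by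
  intro w hw
  simp only [PySem.Str.split₀, List.mem_map] at hw
  rcases hw with ⟨l, hl, rfl⟩
  simpa using pv_split₀_ne_nil s.toList l hl

-- the (surname, first letter) stream both loops consume
def pvChars? : List String → Option (List (String × Char))
  | [] => some []
  | s :: rest =>
    match PySem.List.pyGet? (PySem.Str.split₀ s) 1 with
    | none => none
    | some w =>
      match PySem.Str.pyGet? w 0 with
      | none => none
      | some c => (pvChars? rest).map ((w, c) :: ·)

theorem pvChars?_isSome (xs : List String) (h : ∀ s ∈ xs, 2 ≤ (PySem.Str.split₀ s).length) :
    ∃ l, pvChars? xs = some l := by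
  induction xs with
  | nil => exact ⟨[], rfl⟩
  | cons s rest ih =>
    have h1 : 1 < (PySem.Str.split₀ s).length := by
      have := h s (by simp); omega
    have hget : PySem.List.pyGet? (PySem.Str.split₀ s) 1 = some (PySem.Str.split₀ s)[1] :=
      PySem.List.pyGet?_ofNat _ _ h1
    set w := (PySem.Str.split₀ s)[1] with hw
    have hwne : w.toList ≠ [] := pv_str_split₀_toList_ne_nil s w (List.getElem_mem h1)
    obtain ⟨c, tl, hct⟩ : ∃ c tl, w.toList = c :: tl := by
      cases hct : w.toList with
      | nil => exact absurd hct hwne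
      | cons c tl => exact ⟨c, tl, rfl⟩
    have hc : PySem.Str.pyGet? w 0 = some c := by
      simp [PySem.Str.pyGet?, hct]
    obtain ⟨l, hl⟩ := ih (fun t ht => h t (by simp [ht]))
    exact ⟨(w, c) :: l, by simp [pvChars?, hget, hl, hct]⟩

-- A's loop appends each surname to the bucket its first letter's range selects
theorem pvLoopA_eq (xs : List String) : ∀ (l : List (String × Char)), pvChars? xs = some l →
    ∀ a j q u, pvLoopA xs (a, j, q, u) = some
      (a ++ (l.filter (fun t => pvA2I t.2)).map Prod.fst,
       j ++ (l.filter (fun t => pvJ2P t.2)).map Prod.fst,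
       q ++ (l.filter (fun t => pvQ2T t.2)).map Prod.fst,
       u ++ (l.filter (fun t => pvU2Z t.2)).map Prod.fst) := by
  induction xs with
  | nil => intro l hl a j q u; cases hl; simp [pvLoopA]
  | cons s rest ih =>
    intro l hl a j q u
    simp only [pvChars?] at hl
    cases hg : PySem.List.pyGet? (PySem.Str.split₀ s) 1 with
    | none => rw [hg] at hl; try dsimp only at hl; cases hl
    | some w =>
      rw [hg] at hl; try dsimp only at hl
      cases hc : PySem.Str.pyGet? w 0 with
      | none => rw [hc] at hl; try dsimp only at hl; cases hl
      | some c =>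
        rw [hc] at hl; try dsimp only at hl
        cases hrest : pvChars? rest with
        | none => rw [hrest] at hl; simp at hl
        | some l' =>
          rw [hrest] at hl; try dsimp only at hl
          simp only [Option.map_some, Option.some_inj] at hl
          subst hl
          simp only [pvLoopA, hg, hc]
          split_ifs with h1 h2 h3 h4
          · have e1 : pvA2I c = true := by
              simp only [pvA2I, decide_eq_true_eq]
              have hJ : 'J'.toNat = 74 := by decide
              have hQ : 'Q'.toNat = 81 := by decide
              have hU : 'U'.toNat = 85 := by decide
              have hZ : 'Z'.toNat = 90 := by decide
              omega
            have e2 : pvJ2P c = false := by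
              simp only [pvJ2P, decide_eq_false_iff_not]
              have hJ : 'J'.toNat = 74 := by decide
              have hQ : 'Q'.toNat = 81 := by decide
              have hU : 'U'.toNat = 85 := by decide
              have hZ : 'Z'.toNat = 90 := by decide
              omega
            have e3 : pvQ2T c = false := by
              simp only [pvQ2T, decide_eq_false_iff_not]
              have hJ : 'J'.toNat = 74 := by decide
              have hQ : 'Q'.toNat = 81 := by decide
              have hU : 'U'.toNat = 85 := by decide
              have hZ : 'Z'.toNat = 90 := by decide
              omega
            have e4 : pvU2Z c = false := by
              simp only [pvU2Z, decide_eq_false_iff_not]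
              have hJ : 'J'.toNat = 74 := by decide
              have hQ : 'Q'.toNat = 81 := by decide
              have hU : 'U'.toNat = 85 := by decide
              have hZ : 'Z'.toNat = 90 := by decide
              omega
            rw [ih l' hrest]
            simp [e1, e2, e3, e4]
          · have e1 : pvA2I c = false := by
              simp only [pvA2I, decide_eq_false_iff_not]
              have hJ : 'J'.toNat = 74 := by decide
              have hQ : 'Q'.toNat = 81 := by decide
              have hU : 'U'.toNat = 85 := by decide
              have hZ : 'Z'.toNat = 90 := by decide
              omega
            have e2 : pvJ2P c = true := by
              simp only [pvJ2P, decide_eq_true_eq]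
              have hJ : 'J'.toNat = 74 := by decide
              have hQ : 'Q'.toNat = 81 := by decide
              have hU : 'U'.toNat = 85 := by decide
              have hZ : 'Z'.toNat = 90 := by decide
              omega
            have e3 : pvQ2T c = false := by
              simp only [pvQ2T, decide_eq_false_iff_not]
              have hJ : 'J'.toNat = 74 := by decide
              have hQ : 'Q'.toNat = 81 := by decide
              have hU : 'U'.toNat = 85 := by decide
              have hZ : 'Z'.toNat = 90 := by decide
              omega
            have e4 : pvU2Z c = false := by
              simp only [pvU2Z, decide_eq_false_iff_not]
              have hJ : 'J'.toNat = 74 := by decide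
              have hQ : 'Q'.toNat = 81 := by decide
              have hU : 'U'.toNat = 85 := by decide
              have hZ : 'Z'.toNat = 90 := by decide
              omega
            rw [ih l' hrest]
            simp [e1, e2, e3, e4]
          · have e1 : pvA2I c = false := by
              simp only [pvA2I, decide_eq_false_iff_not]
              have hJ : 'J'.toNat = 74 := by decide
              have hQ : 'Q'.toNat = 81 := by decide
              have hU : 'U'.toNat = 85 := by decide
              have hZ : 'Z'.toNat = 90 := by decide
              omega
            have e2 : pvJ2P c = false := by
              simp only [pvJ2P, decide_eq_false_iff_not]
              have hJ : 'J'.toNat = 74 := by decide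
              have hQ : 'Q'.toNat = 81 := by decide
              have hU : 'U'.toNat = 85 := by decide
              have hZ : 'Z'.toNat = 90 := by decide
              omega
            have e3 : pvQ2T c = true := by
              simp only [pvQ2T, decide_eq_true_eq]
              have hJ : 'J'.toNat = 74 := by decide
              have hQ : 'Q'.toNat = 81 := by decide
              have hU : 'U'.toNat = 85 := by decide
              have hZ : 'Z'.toNat = 90 := by decide
              omega
            have e4 : pvU2Z c = false := by
              simp only [pvU2Z, decide_eq_false_iff_not]
              have hJ : 'J'.toNat = 74 := by decide
              have hQ : 'Q'.toNat = 81 := by decide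
              have hU : 'U'.toNat = 85 := by decide
              have hZ : 'Z'.toNat = 90 := by decide
              omega
            rw [ih l' hrest]
            simp [e1, e2, e3, e4]
          · have e1 : pvA2I c = false := by
              simp only [pvA2I, decide_eq_false_iff_not]
              have hJ : 'J'.toNat = 74 := by decide
              have hQ : 'Q'.toNat = 81 := by decide
              have hU : 'U'.toNat = 85 := by decide
              have hZ : 'Z'.toNat = 90 := by decide
              omega
            have e2 : pvJ2P c = false := by
              simp only [pvJ2P, decide_eq_false_iff_not]
              have hJ : 'J'.toNat = 74 := by decide
              have hQ : 'Q'.toNat = 81 := by decide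
              have hU : 'U'.toNat = 85 := by decide
              have hZ : 'Z'.toNat = 90 := by decide
              omega
            have e3 : pvQ2T c = false := by
              simp only [pvQ2T, decide_eq_false_iff_not]
              have hJ : 'J'.toNat = 74 := by decide
              have hQ : 'Q'.toNat = 81 := by decide
              have hU : 'U'.toNat = 85 := by decide
              have hZ : 'Z'.toNat = 90 := by decide
              omega
            have e4 : pvU2Z c = true := by
              simp only [pvU2Z, decide_eq_true_eq]
              have hJ : 'J'.toNat = 74 := by decide
              have hQ : 'Q'.toNat = 81 := by decide
              have hU : 'U'.toNat = 85 := by decide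
              have hZ : 'Z'.toNat = 90 := by decide
              omega
            rw [ih l' hrest]
            simp [e1, e2, e3, e4]
          · have e1 : pvA2I c = false := by
              simp only [pvA2I, decide_eq_false_iff_not]
              have hJ : 'J'.toNat = 74 := by decide
              have hQ : 'Q'.toNat = 81 := by decide
              have hU : 'U'.toNat = 85 := by decide
              have hZ : 'Z'.toNat = 90 := by decide
              omega
            have e2 : pvJ2P c = false := by
              simp only [pvJ2P, decide_eq_false_iff_not]
              have hJ : 'J'.toNat = 74 := by decide
              have hQ : 'Q'.toNat = 81 := by decide
              have hU : 'U'.toNat = 85 := by decide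
              have hZ : 'Z'.toNat = 90 := by decide
              omega
            have e3 : pvQ2T c = false := by
              simp only [pvQ2T, decide_eq_false_iff_not]
              have hJ : 'J'.toNat = 74 := by decide
              have hQ : 'Q'.toNat = 81 := by decide
              have hU : 'U'.toNat = 85 := by decide
              have hZ : 'Z'.toNat = 90 := by decide
              omega
            have e4 : pvU2Z c = false := by
              simp only [pvU2Z, decide_eq_false_iff_not]
              have hJ : 'J'.toNat = 74 := by decide
              have hQ : 'Q'.toNat = 81 := by decide
              have hU : 'U'.toNat = 85 := by decide
              have hZ : 'Z'.toNat = 90 := by decide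
              omega
            rw [ih l' hrest]
            simp [e1, e2, e3, e4]

-- B's pass 1 is the Counter fold over the first letters
theorem pvLoopB_eq (xs : List String) : ∀ (l : List (String × Char)), pvChars? xs = some l →
    ∀ d, pvLoopB xs d = some
      ((l.map Prod.snd).foldl (fun d c => d.insert c (d.getD c 0 + 1)) d) := by
  induction xs with
  | nil => intro l hl d; cases hl; simp [pvLoopB]
  | cons s rest ih =>
    intro l hl d
    simp only [pvChars?] at hl
    cases hg : PySem.List.pyGet? (PySem.Str.split₀ s) 1 with
    | none => rw [hg] at hl; try dsimp only at hl; cases hl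
    | some w =>
      rw [hg] at hl; try dsimp only at hl
      cases hc : PySem.Str.pyGet? w 0 with
      | none => rw [hc] at hl; try dsimp only at hl; cases hl
      | some c =>
        rw [hc] at hl; try dsimp only at hl
        cases hrest : pvChars? rest with
        | none => rw [hrest] at hl; simp at hl
        | some l' =>
          rw [hrest] at hl; try dsimp only at hl
          simp only [Option.map_some, Option.some_inj] at hl
          subst hl
          simp only [pvLoopB, hg, hc, List.map_cons, List.foldl_cons]
          exact ih l' hrest _

-- sum of an indicator over a duplicate-free filtered list
theorem pv_sum_ind (p : Char → Bool) (c : Char) :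
    ∀ ds : List Char, ds.Nodup →
      (((ds.filter p).map (fun k => if c = k then 1 else 0)).sum : Nat)
        = (if c ∈ ds ∧ p c then 1 else 0) := by
  intro ds
  induction ds with
  | nil => simp
  | cons d ds ih =>
    intro hnd
    obtain ⟨hdn, hnd2⟩ := List.nodup_cons.mp hnd
    by_cases hp : p d
    · by_cases hcd : c = d
      · subst hcd
        have hnotin : c ∉ ds := hdn
        simp [hp, ih hnd2, hnotin]
      · simp [hp, ih hnd2, hcd]
    · by_cases hcd : c = d
      · subst hcd
        simp [hp, ih hnd2, hdn]
      · simp [hp, ih hnd2, hcd]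

-- counts of cs summed over any duplicate-free superset of its elements = countP
theorem pv_count_sum (p : Char → Bool) (ds : List Char) (hnd : ds.Nodup) :
    ∀ cs : List Char, (∀ x ∈ cs, x ∈ ds) →
      ((ds.filter p).map (fun k => cs.count k)).sum = cs.countP p := by
  intro cs
  induction cs with
  | nil => simp
  | cons c cs ih =>
    intro hsub
    have h1 : ∀ x ∈ cs, x ∈ ds := fun x hx => hsub x (List.mem_cons_of_mem _ hx)
    have hc : c ∈ ds := hsub c List.mem_cons_self
    have hfun : (fun k => List.count k (c :: cs))
        = fun k => List.count k cs + if c = k then 1 else 0 := by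
      funext k; rw [List.count_cons]; simp [beq_iff_eq]
    rw [hfun, List.sum_map_add, ih h1, pv_sum_ind p c ds hnd, List.countP_cons]
    simp [hc]

-- pass 2 on Counter(cs) computes countP over cs
theorem pv_rangeSum_counter (cs : List Char) (p : Char → Bool) :
    pvRangeSum (PySem.Dict.counter cs).items p = ((cs.countP p : Nat) : Int) := by
  unfold pvRangeSum
  rw [PySem.Dict.items_counter, List.filter_map, PySem.List.foldl_add]
  have hcomp : ((fun q : Char × Int => p q.1) ∘ fun k => (k, (List.count k cs : Int)))
      = fun k => p k := rfl
  rw [hcomp, List.map_map]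
  have hmap : ((Prod.snd ∘ fun k => (k, (List.count k cs : Int))))
      = fun k => ((List.count k cs : Nat) : Int) := rfl
  rw [hmap]
  have := pv_count_sum p (PySem.Set.ofList cs) (PySem.Set.nodup_ofList cs) cs
    (fun x hx => (PySem.Set.mem_ofList cs x).mpr hx)
  rw [show (fun k => ((List.count k cs : Nat) : Int))
        = (fun n : Nat => (n : Int)) ∘ (fun k => List.count k cs) from rfl,
      ← List.map_map, ← Nat.cast_list_sum, this]
  simp

-- ===== VERDICT (by name: the statement is the Claim_ definition above) =====
theorem group_by_surname_spec : Claim_equal_group_by_surname := by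
  intro xs hdom hpre
  obtain ⟨l, hl⟩ := pvChars?_isSome xs hpre
  unfold Spec_group_by_surname group_by_surname group_by_surname_alt
  rw [pvLoopA_eq xs l hl [] [] [] [], pvLoopB_eq xs l hl PySem.Dict.empty,
      PySem.Dict.foldl_insert_getD_add_one_eq_counter]
  simp only [pv_rangeSum_counter, List.nil_append, List.length_map, List.countP_map,
    Function.comp_def, ← List.countP_eq_length_filter]
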